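-- pv_equiv track=rewrite | github.com/DCrawley94/advent-of-code-2022 | src/day4/camp_cleanup.py | make_shift_diagram
-- ===== SOURCE A (Python) =====
-- def make_shift_diagram(start, end):
--     diagram = ""
--     for i in range(1,10):
--         if i >= start and i <= end:
--             diagram += str(i)
--         else:
--             diagram += '.'
--
--     return diagram
-- ===== SOURCE B (Python) =====
-- def make_shift_diagram(start, end):
--     lo = max(1, start)
--     hi = min(9, end)
--     if lo > hi:
--         return '.' * 9
--     return '.' * (lo - 1) + '123456789'[lo - 1:hi] + '.' * (9 - hi)
-- ===== Notes on version B (the rewrite author's own statement) =====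
-- stated objective: simpler
-- what changed: B replaces the per-position loop over 1..9 (appending a digit or dot per iteration) with a direct construction from the clamped interval: dot padding, a slice of '123456789', dot padding.
import Mathlib
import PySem

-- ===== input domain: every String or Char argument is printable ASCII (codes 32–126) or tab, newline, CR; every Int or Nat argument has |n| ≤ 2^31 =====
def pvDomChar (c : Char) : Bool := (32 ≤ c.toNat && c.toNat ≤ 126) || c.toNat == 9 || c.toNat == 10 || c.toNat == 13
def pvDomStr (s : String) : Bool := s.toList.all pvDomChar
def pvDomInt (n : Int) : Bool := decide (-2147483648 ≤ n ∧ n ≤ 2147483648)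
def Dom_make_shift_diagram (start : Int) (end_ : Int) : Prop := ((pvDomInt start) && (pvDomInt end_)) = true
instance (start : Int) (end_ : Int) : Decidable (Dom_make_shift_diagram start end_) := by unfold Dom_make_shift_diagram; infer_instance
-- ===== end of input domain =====

-- B builds the diagram directly from the clamped interval [max 1 start, min 9 end] by slicing,
-- instead of A's per-position loop over 1..9 (objective: simpler, no speed claim).

-- ===== PORT A =====
def make_shift_diagram (start : Int) (end_ : Int) : String :=
  (PySem.List.pyRange 1 10 1).foldl
    (fun diagram i =>
      diagram ++ (if start ≤ i ∧ i ≤ end_ then PySem.Int.toStr i else ".")) ""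

-- ===== PORT B =====
def make_shift_diagram_alt (start : Int) (end_ : Int) : String :=
  let lo := max 1 start
  let hi := min 9 end_
  if lo > hi then String.ofList (List.replicate 9 '.')
  else
    String.ofList (List.replicate (lo - 1).toNat '.'
      ++ PySem.List.slice ("123456789".toList) (some (lo - 1)) (some hi)
      ++ List.replicate (9 - hi).toNat '.')

-- ===== PRECONDITION & SPEC =====
def Spec_make_shift_diagram (start : Int) (end_ : Int) (out : String) : Prop := out = make_shift_diagram_alt start end_
instance (start : Int) (end_ : Int) (out : String) : Decidable (Spec_make_shift_diagram start end_ out) := by unfold Spec_make_shift_diagram; infer_instance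

-- ===== CLAIM (what is proved, stated in full; the proofs are below) =====
def Claim_equal_make_shift_diagram : Prop := ∀ (start : Int) (end_ : Int), Dom_make_shift_diagram start end_ → Spec_make_shift_diagram start end_ (make_shift_diagram start end_)

-- ===== LEMMAS AND PROOFS =====

-- A's loop, as a function of the clamped bounds only.
def pvAcore (lo hi : Int) : String :=
  ([1,2,3,4,5,6,7,8,9] : List Int).foldl
    (fun diagram i =>
      diagram ++ (if lo ≤ i ∧ i ≤ hi then PySem.Int.toStr i else ".")) ""

-- B's construction, as a function of the clamped bounds only.
def pvBcore (lo hi : Int) : String :=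
  if lo > hi then String.ofList (List.replicate 9 '.')
  else
    String.ofList (List.replicate (lo - 1).toNat '.'
      ++ PySem.List.slice ("123456789".toList) (some (lo - 1)) (some hi)
      ++ List.replicate (9 - hi).toNat '.')

lemma pvA_eq (start end_ : Int) :
    make_shift_diagram start end_ = pvAcore (min (max 1 start) 10) (max (min 9 end_) 0) := by
  have hr : PySem.List.pyRange 1 10 1 = ([1,2,3,4,5,6,7,8,9] : List Int) := by decide
  have h1 : (start ≤ (1:Int) ∧ (1:Int) ≤ end_) ↔ (min (max 1 start) 10 ≤ (1:Int) ∧ (1:Int) ≤ max (min 9 end_) 0) := by omega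
  have h2 : (start ≤ (2:Int) ∧ (2:Int) ≤ end_) ↔ (min (max 1 start) 10 ≤ (2:Int) ∧ (2:Int) ≤ max (min 9 end_) 0) := by omega
  have h3 : (start ≤ (3:Int) ∧ (3:Int) ≤ end_) ↔ (min (max 1 start) 10 ≤ (3:Int) ∧ (3:Int) ≤ max (min 9 end_) 0) := by omega
  have h4 : (start ≤ (4:Int) ∧ (4:Int) ≤ end_) ↔ (min (max 1 start) 10 ≤ (4:Int) ∧ (4:Int) ≤ max (min 9 end_) 0) := by omega
  have h5 : (start ≤ (5:Int) ∧ (5:Int) ≤ end_) ↔ (min (max 1 start) 10 ≤ (5:Int) ∧ (5:Int) ≤ max (min 9 end_) 0) := by omega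
  have h6 : (start ≤ (6:Int) ∧ (6:Int) ≤ end_) ↔ (min (max 1 start) 10 ≤ (6:Int) ∧ (6:Int) ≤ max (min 9 end_) 0) := by omega
  have h7 : (start ≤ (7:Int) ∧ (7:Int) ≤ end_) ↔ (min (max 1 start) 10 ≤ (7:Int) ∧ (7:Int) ≤ max (min 9 end_) 0) := by omega
  have h8 : (start ≤ (8:Int) ∧ (8:Int) ≤ end_) ↔ (min (max 1 start) 10 ≤ (8:Int) ∧ (8:Int) ≤ max (min 9 end_) 0) := by omega
  have h9 : (start ≤ (9:Int) ∧ (9:Int) ≤ end_) ↔ (min (max 1 start) 10 ≤ (9:Int) ∧ (9:Int) ≤ max (min 9 end_) 0) := by omega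
  simp only [make_shift_diagram, pvAcore, hr, List.foldl, h1, h2, h3, h4, h5, h6, h7, h8, h9]

lemma pvB_eq (start end_ : Int) :
    make_shift_diagram_alt start end_ = pvBcore (min (max 1 start) 10) (max (min 9 end_) 0) := by
  unfold make_shift_diagram_alt pvBcore
  by_cases hlo : max 1 start ≤ 10
  · by_cases hhi : 0 ≤ min 9 end_
    · rw [min_eq_left hlo, max_eq_left hhi]
    · have h1 : max 1 start > min 9 end_ := by omega
      have h2 : min (max 1 start) 10 > max (min 9 end_) 0 := by omega
      simp [h1, h2]
  · have h1 : max 1 start > min 9 end_ := by omega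
    have h2 : min (max 1 start) 10 > max (min 9 end_) 0 := by omega
    simp [h1, h2]

lemma pvCore_eq (lo hi : Int) (h1 : 1 ≤ lo) (h2 : lo ≤ 10) (h3 : 0 ≤ hi) (h4 : hi ≤ 9) :
    pvAcore lo hi = pvBcore lo hi := by
  interval_cases lo <;> interval_cases hi <;> decide

-- ===== VERDICT (by name: the statement is the Claim_ definition above) =====
theorem make_shift_diagram_spec : Claim_equal_make_shift_diagram := by
  intro start end_ _
  unfold Spec_make_shift_diagram
  rw [pvA_eq, pvB_eq, pvCore_eq] <;> omega
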